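-- pv_equiv track=rewrite | github.com/radical-collaboration/IMPRESS | examples/discontinuous_scaffolds/scripts/analysis.py | parse_contig
-- ===== SOURCE A (Python) =====
-- def parse_contig(contig_str: str) -> dict:
--     """Parse contig and return {(chain, resnum): chai1_seq_pos} (1-indexed)."""
--     mapping = {}
--     pos = 1
--     for token in contig_str.split(","):
--         token = token.strip()
--         if not token:
--             continue
--         if token[0].isalpha():
--             chain = token[0]
--             rest = token[1:]
--             if "-" in rest:
--                 start_s, end_s = rest.split("-", 1)
--                 for resnum in range(int(start_s), int(end_s) + 1):
--                     mapping[(chain, resnum)] = pos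
--                     pos += 1
--             else:
--                 mapping[(chain, int(rest))] = pos
--                 pos += 1
--         else:
--             pos += int(token)
--     return mapping
-- ===== SOURCE B (Python) =====
-- def parse_contig(contig_str: str) -> dict:
--     """Parse contig and return {(chain, resnum): chai1_seq_pos} (1-indexed).
--
--     Two-phase re-implementation: first normalize the comma-split tokens into a
--     segment list (residue runs and gaps), then compute each segment's starting
--     position by a prefix sum over segment lengths, and finally emit the mapping
--     from the segments with their precomputed start offsets.
--     """
--     # phase 1: tokens -> segments ('run', chain, lo, hi) | ('gap', n)
--     segments = []
--     for token in contig_str.split(","):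
--         token = token.strip()
--         if not token:
--             continue
--         if token[0].isalpha():
--             chain, rest = token[0], token[1:]
--             if "-" in rest:
--                 lo_s, hi_s = rest.split("-", 1)
--                 segments.append(("run", chain, int(lo_s), int(hi_s)))
--             else:
--                 n = int(rest)
--                 segments.append(("run", chain, n, n))
--         else:
--             segments.append(("gap", None, int(token), 0))
--
--     def seg_len(seg):
--         kind, _, lo, hi = seg
--         return max(hi - lo + 1, 0) if kind == "run" else lo
--
--     # phase 2: prefix sum of segment lengths -> start offset of each segment
--     starts = []
--     pos = 1
--     for seg in segments:
--         starts.append(pos)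
--         pos += seg_len(seg)
--
--     # phase 3: emit the mapping
--     mapping = {}
--     for seg, start in zip(segments, starts):
--         kind, chain, lo, hi = seg
--         if kind == "run":
--             for i in range(hi - lo + 1):
--                 mapping[(chain, lo + i)] = start + i
--     return mapping
-- ===== Notes on version B (the rewrite author's own statement) =====
-- stated objective: alternative
-- what changed: Replaces A's single pass with a running position counter by a three-phase pipeline: tokens are first normalized into a segment list (runs and gaps), each segment's start offset is then computed by a prefix sum over segment lengths, and the mapping is emitted in a separate pass from segments and offsets.
import Mathlib
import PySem

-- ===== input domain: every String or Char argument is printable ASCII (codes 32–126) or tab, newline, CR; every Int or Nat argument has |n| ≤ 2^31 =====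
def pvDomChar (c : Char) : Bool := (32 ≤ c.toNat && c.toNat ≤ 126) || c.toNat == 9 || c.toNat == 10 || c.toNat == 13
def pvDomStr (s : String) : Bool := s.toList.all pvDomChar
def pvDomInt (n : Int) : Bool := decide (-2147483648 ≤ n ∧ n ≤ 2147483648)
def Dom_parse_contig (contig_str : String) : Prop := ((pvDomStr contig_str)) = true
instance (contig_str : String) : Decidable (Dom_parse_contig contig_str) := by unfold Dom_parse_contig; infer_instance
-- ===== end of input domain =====

-- B re-implements the single running-position pass as a three-phase pipeline
-- (segments, prefix-sum start offsets, emission); equivalence of the return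
-- value is proved on all inputs where A returns (no int() ValueError).

-- ===== PORT A =====
-- one iteration of A's loop: state = (mapping, pos); where Python's int() would
-- raise ValueError (excluded by Pre_) the step leaves the state unchanged
def pvA_step (st : PySem.Dict (String × Int) Int × Int) (token : List Char) :
    PySem.Dict (String × Int) Int × Int :=
  match PySem.Chars.strip token with
  | [] => st
  | c :: rest =>
    if PySem.Chars.isalpha c then
      let chain := String.ofList [c]
      if PySem.Chars.isIn ['-'] rest then
        match PySem.Chars.splitOnMax rest ['-'] 1 with
        | [s1, s2] =>
          match PySem.Int.ofChars? s1, PySem.Int.ofChars? s2 with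
          | some a, some b =>
            (PySem.List.pyRange a (b + 1)).foldl
              (fun st r => (st.1.insert (chain, r) st.2, st.2 + 1)) st
          | _, _ => st        -- ValueError (outside Pre_)
        | _ => st             -- unreachable: '-' occurs in rest
      else
        match PySem.Int.ofChars? rest with
        | some n => (st.1.insert (chain, n) st.2, st.2 + 1)
        | none => st          -- ValueError (outside Pre_)
    else
      match PySem.Int.ofChars? (c :: rest) with
      | some g => (st.1, st.2 + g)
      | none => st            -- ValueError (outside Pre_)

def parse_contig (contig_str : String) : List (String × Int × Int) :=
  let st := (PySem.Chars.splitOn contig_str.toList [',']).foldl pvA_step (PySem.Dict.empty, 1)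
  st.1.items.map (fun p => (p.1.1, p.1.2, p.2))

-- ===== PORT B =====
-- a normalized segment: a residue run (chain, lo, hi) or a gap of n positions
inductive PvSeg : Type
  | run : String → Int → Int → PvSeg
  | gap : Int → PvSeg
deriving DecidableEq, Repr

-- phase 1: a token to its segment (none = blank token; also none where Python's
-- int() would raise ValueError, outside Pre_)
def pvB_tokSeg (token : List Char) : Option PvSeg :=
  match PySem.Chars.strip token with
  | [] => none
  | c :: rest =>
    if PySem.Chars.isalpha c then
      if PySem.Chars.isIn ['-'] rest then
        match PySem.Chars.splitOnMax rest ['-'] 1 with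
        | [s1, s2] =>
          match PySem.Int.ofChars? s1, PySem.Int.ofChars? s2 with
          | some a, some b => some (.run (String.ofList [c]) a b)
          | _, _ => none
        | _ => none
      else (PySem.Int.ofChars? rest).map (fun n => .run (String.ofList [c]) n n)
    else (PySem.Int.ofChars? (c :: rest)).map .gap

def pvSegLen : PvSeg → Int
  | .run _ lo hi => max (hi - lo + 1) 0
  | .gap n => n

-- phase 3 body: emit one segment at its start offset
def pvB_emit (d : PySem.Dict (String × Int) Int) (p : PvSeg × Int) :
    PySem.Dict (String × Int) Int :=
  match p.1 with
  | .run chain lo hi =>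
    (PySem.List.pyRange 0 (hi - lo + 1)).foldl
      (fun d i => d.insert (chain, lo + i) (p.2 + i)) d
  | .gap _ => d

def parse_contig_alt (contig_str : String) : List (String × Int × Int) :=
  let segs := (PySem.Chars.splitOn contig_str.toList [',']).filterMap pvB_tokSeg
  -- phase 2: prefix sum of segment lengths gives each segment's start offset
  let withStarts := (segs.foldl
    (fun (a : List (PvSeg × Int) × Int) s => (a.1 ++ [(s, a.2)], a.2 + pvSegLen s))
    ([], 1)).1
  ((withStarts.foldl pvB_emit PySem.Dict.empty).items).map (fun p => (p.1.1, p.1.2, p.2))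

-- ===== PRECONDITION & SPEC =====
-- a token after stripping: blank, or parses as A needs (every int() succeeds)
def pvTokOk (token : List Char) : Bool :=
  match PySem.Chars.strip token with
  | [] => true
  | c :: rest =>
    if PySem.Chars.isalpha c then
      if PySem.Chars.isIn ['-'] rest then
        match PySem.Chars.splitOnMax rest ['-'] 1 with
        | [s1, s2] => (PySem.Int.ofChars? s1).isSome && (PySem.Int.ofChars? s2).isSome
        | _ => true
      else (PySem.Int.ofChars? rest).isSome
    else (PySem.Int.ofChars? (c :: rest)).isSome

-- Pre_ excludes exactly the inputs where A raises ValueError from int()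
def Pre_parse_contig (contig_str : String) : Prop :=
  ∀ tok ∈ PySem.Chars.splitOn contig_str.toList [','], pvTokOk tok = true

instance (contig_str : String) : Decidable (Pre_parse_contig contig_str) := by
  unfold Pre_parse_contig; infer_instance

def pvWitness_parse_contig : String := "A1-3, 5 ,B7,-2"

def Spec_parse_contig (contig_str : String) (out : List (String × Int × Int)) : Prop :=
  out = parse_contig_alt contig_str
instance (contig_str : String) (out : List (String × Int × Int)) : Decidable (Spec_parse_contig contig_str out) := by unfold Spec_parse_contig; infer_instance

-- ===== CLAIM (what is proved, stated in full; the proofs are below) =====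
def Claim_equal_parse_contig : Prop := ∀ (contig_str : String), Dom_parse_contig contig_str → Pre_parse_contig contig_str → Spec_parse_contig contig_str (parse_contig contig_str)

-- ===== LEMMAS AND PROOFS =====

-- emit a segment (phase-3 body) at a given start offset
def pvEmitSeg (d : PySem.Dict (String × Int) Int) (s : PvSeg) (pos : Int) :
    PySem.Dict (String × Int) Int := pvB_emit d (s, pos)

-- folding emission over segments while tracking the running position
def pvEmitAll (segs : List PvSeg) (st : PySem.Dict (String × Int) Int × Int) :
    PySem.Dict (String × Int) Int × Int :=
  segs.foldl (fun st s => (pvEmitSeg st.1 s st.2, st.2 + pvSegLen s)) st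

-- the (segment, start) pairs produced by B's phase 2
def pvPairs (segs : List PvSeg) (pos : Int) : List (PvSeg × Int) :=
  match segs with
  | [] => []
  | s :: ss => (s, pos) :: pvPairs ss (pos + pvSegLen s)

theorem pv_run_core_nat (n : Nat) : ∀ (lo pos : Int) (d : PySem.Dict (String × Int) Int)
    (chain : String),
    (PySem.List.pyRange lo (lo + n)).foldl
        (fun st r => (st.1.insert (chain, r) st.2, st.2 + 1)) (d, pos)
      = ((PySem.List.pyRange 0 (n : Int)).foldl
            (fun d i => d.insert (chain, lo + i) (pos + i)) d,
         pos + n) := by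
  induction n with
  | zero => intro lo pos d chain; simp [PySem.List.pyRange_one_eq_nil le_rfl]
  | succ n ih =>
    intro lo pos d chain
    have h1 : (lo + (n + 1 : Nat) : Int) = (lo + n) + 1 := by push_cast; ring
    have h2 : ((n + 1 : Nat) : Int) = (n : Int) + 1 := by push_cast; ring
    rw [h1, PySem.List.pyRange_one_succ_right (by omega), h2,
      PySem.List.pyRange_one_succ_right (by omega), List.foldl_append,
      List.foldl_append, ih]
    simp only [List.foldl_cons, List.foldl_nil]
    rw [add_assoc]

theorem pv_run_core (lo hi pos : Int) (d : PySem.Dict (String × Int) Int) (chain : String) :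
    (PySem.List.pyRange lo (hi + 1)).foldl
        (fun st r => (st.1.insert (chain, r) st.2, st.2 + 1)) (d, pos)
      = (pvEmitSeg d (.run chain lo hi) pos, pos + pvSegLen (.run chain lo hi)) := by
  simp only [pvEmitSeg, pvB_emit, pvSegLen]
  by_cases h : hi + 1 ≤ lo
  · rw [PySem.List.pyRange_one_eq_nil h, PySem.List.pyRange_one_eq_nil (by omega)]
    simp; omega
  · have hn : hi + 1 = lo + ((hi + 1 - lo).toNat : Int) := by omega
    have := pv_run_core_nat (hi + 1 - lo).toNat lo pos d chain
    rw [hn, this]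
    have h1 : (((hi + 1 - lo).toNat : Int)) = hi - lo + 1 := by omega
    have h2 : max (hi - lo + 1) 0 = hi - lo + 1 := by omega
    rw [h1, h2]

theorem pv_step_eq (tok : List Char) (st : PySem.Dict (String × Int) Int × Int)
    (hok : pvTokOk tok = true) :
    pvA_step st tok
      = match pvB_tokSeg tok with
        | none => st
        | some s => (pvEmitSeg st.1 s st.2, st.2 + pvSegLen s) := by
  obtain ⟨d, pos⟩ := st
  unfold pvA_step pvB_tokSeg pvTokOk at *
  cases hstrip : PySem.Chars.strip tok with
  | nil => simp
  | cons c rest =>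
    rw [hstrip] at hok
    by_cases halpha : PySem.Chars.isalpha c = true
    · simp only [halpha, if_true] at hok ⊢
      by_cases hdash : PySem.Chars.isIn ['-'] rest = true
      · simp only [hdash, if_true] at hok ⊢
        cases hsp : PySem.Chars.splitOnMax rest ['-'] 1 with
        | nil => simp
        | cons x xs =>
          cases xs with
          | nil => simp
          | cons y ys =>
            cases ys with
            | cons z zs => simp
            | nil =>
              rw [hsp] at hok
              cases ha : PySem.Int.ofChars? x with
              | none => simp [ha] at hok
              | some a =>
                cases hb : PySem.Int.ofChars? y with
                | none => simp [ha, hb] at hok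
                | some b => simp only [ha, hb]; exact pv_run_core _ _ _ _ _
      · simp only [hdash] at hok ⊢
        cases hr : PySem.Int.ofChars? rest with
        | none => simp [hr] at hok
        | some n =>
          simp only [Option.map_some]
          have := pv_run_core n n pos d (String.ofList [c])
          rw [PySem.List.pyRange_one_singleton] at this
          simpa using this
    · simp only [halpha] at hok ⊢
      cases hg : PySem.Int.ofChars? (c :: rest) with
      | none => simp [hg] at hok
      | some g => simp [pvEmitSeg, pvB_emit, pvSegLen]

theorem pv_main (toks : List (List Char)) : ∀ (st : PySem.Dict (String × Int) Int × Int),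
    (∀ t ∈ toks, pvTokOk t = true) →
    toks.foldl pvA_step st = pvEmitAll (toks.filterMap pvB_tokSeg) st := by
  induction toks with
  | nil => intro st _; rfl
  | cons t ts ih =>
    intro st hok
    have ht := hok t (by simp)
    have hts : ∀ t' ∈ ts, pvTokOk t' = true := fun t' h => hok t' (by simp [h])
    simp only [List.foldl_cons, List.filterMap_cons]
    rw [pv_step_eq t st ht]
    cases hseg : pvB_tokSeg t with
    | none => exact ih st hts
    | some s =>
      simp only [pvEmitAll, List.foldl_cons]
      exact ih _ hts

theorem pv_starts_aux (segs : List PvSeg) : ∀ (l : List (PvSeg × Int)) (pos : Int),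
    (segs.foldl
      (fun (a : List (PvSeg × Int) × Int) s => (a.1 ++ [(s, a.2)], a.2 + pvSegLen s))
      (l, pos)).1 = l ++ pvPairs segs pos := by
  induction segs with
  | nil => intro l pos; simp [pvPairs]
  | cons s ss ih =>
    intro l pos
    simp only [List.foldl_cons, pvPairs]
    rw [ih]
    simp

theorem pv_pairs_fold (segs : List PvSeg) : ∀ (pos : Int) (d : PySem.Dict (String × Int) Int),
    (pvPairs segs pos).foldl pvB_emit d = (pvEmitAll segs (d, pos)).1 := by
  induction segs with
  | nil => intro pos d; rfl
  | cons s ss ih =>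
    intro pos d
    simp only [pvPairs, List.foldl_cons, pvEmitAll]
    exact ih _ _

-- ===== VERDICT (by name: the statement is the Claim_ definition above) =====
theorem parse_contig_spec : Claim_equal_parse_contig := by
  intro s _hdom hpre
  unfold Spec_parse_contig parse_contig parse_contig_alt
  have hmain := pv_main (PySem.Chars.splitOn s.toList [',']) (PySem.Dict.empty, 1) hpre
  simp only [hmain, pv_starts_aux, List.nil_append, pv_pairs_fold]
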